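-- pv_equiv track=rewrite | github.com/SotirisKavv/COMP211_Project2 | computeSales.py | parse_into_list
-- ===== SOURCE A (Python) =====
-- def parse_into_list(file):
--     res, temp = [],[]
--     for l in file:
--         if l.count('-') == len(l)-1: #checks if line starts with '-'
--             res.append(temp)
--             temp = []
--         else:
--             temp.append(l)
--     return res
-- ===== SOURCE B (Python) =====
-- def parse_into_list(file):
--     lines = list(file)
--     dividers = [i for i, l in enumerate(lines) if l.count('-') == len(l) - 1]
--     res, start = [], 0
--     for d in dividers:
--         res.append(lines[start:d])
--         start = d + 1
--     return res
-- ===== Notes on version B (the rewrite author's own statement) =====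
-- stated objective: alternative
-- what changed: Replaces A's single accumulating pass with (res,temp) state by a two-phase computation: first collect all divider indices with an enumerate comprehension, then build the groups by slicing between consecutive boundaries (dropping the trailing segment after the last divider, as A does).
import Mathlib
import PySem

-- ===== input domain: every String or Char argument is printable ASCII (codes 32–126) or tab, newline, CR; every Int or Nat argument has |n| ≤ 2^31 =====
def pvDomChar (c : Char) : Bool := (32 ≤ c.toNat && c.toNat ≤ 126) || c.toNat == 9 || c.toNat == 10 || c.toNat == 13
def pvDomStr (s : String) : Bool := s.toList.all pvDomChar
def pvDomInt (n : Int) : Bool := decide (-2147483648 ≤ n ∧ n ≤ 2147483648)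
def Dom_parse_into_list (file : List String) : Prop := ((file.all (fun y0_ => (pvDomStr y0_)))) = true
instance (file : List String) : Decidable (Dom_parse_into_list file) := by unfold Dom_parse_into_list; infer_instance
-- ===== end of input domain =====

-- B replaces A's single accumulating pass with (res, temp) state by a two-phase
-- computation: collect all divider indices, then slice between consecutive
-- boundaries; same output everywhere (objective: alternative decomposition).

-- ===== PORT A =====
-- the divider test `l.count('-') == len(l) - 1`, shared verbatim by both programs
def pvIsDiv (l : String) : Bool := ((PySem.Str.count l "-" : Int) == PySem.Str.len l - 1)

def parse_into_list (file : List String) : List (List String) :=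
  (file.foldl
    (fun (st : List (List String) × List String) l =>
      if pvIsDiv l then (st.1 ++ [st.2], []) else (st.1, st.2 ++ [l]))
    ([], [])).1

-- ===== PORT B =====
def parse_into_list_alt (file : List String) : List (List String) :=
  let dividers := ((PySem.List.enumerate file).filter (fun p => pvIsDiv p.2)).map (fun p => p.1)
  (dividers.foldl
    (fun (st : List (List String) × Int) d =>
      (st.1 ++ [PySem.List.slice file (some st.2) (some d)], d + 1))
    ([], 0)).1

-- ===== PRECONDITION & SPEC =====
def Spec_parse_into_list (file : List String) (out : List (List String)) : Prop := out = parse_into_list_alt file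
instance (file : List String) (out : List (List String)) : Decidable (Spec_parse_into_list file out) := by unfold Spec_parse_into_list; infer_instance

-- ===== CLAIM (what is proved, stated in full; the proofs are below) =====
def Claim_equal_parse_into_list : Prop := ∀ (file : List String), Dom_parse_into_list file → Spec_parse_into_list file (parse_into_list file)

-- ===== LEMMAS AND PROOFS =====

-- the divider indices of `file`, enumerated starting at s
def pvDivs (file : List String) (s : Int) : List Int :=
  ((PySem.List.enumerate file s).filter (fun p => pvIsDiv p.2)).map (fun p => p.1)

theorem pvDivs_nil (s : Int) : pvDivs [] s = [] := by
  simp [pvDivs, PySem.List.enumerate_nil]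

theorem pvDivs_cons (l : String) (rest : List String) (s : Int) :
    pvDivs (l :: rest) s =
      if pvIsDiv l then s :: pvDivs rest (s + 1) else pvDivs rest (s + 1) := by
  simp only [pvDivs, PySem.List.enumerate_cons, List.filter_cons]
  split_ifs <;> simp_all

-- B's slicing loop, run against A's loop from a generalized state: the lines
-- already consumed are head ++ temp (head ends at the last divider, temp is A's
-- pending group), start = head.length, remaining dividers indexed from |head|+|temp|.
theorem loop_eq :
    ∀ (file head temp : List String) (res : List (List String)),
    ((pvDivs file ((head.length : Int) + (temp.length : Int))).foldl
      (fun (st : List (List String) × Int) d =>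
        (st.1 ++ [PySem.List.slice (head ++ temp ++ file) (some st.2) (some d)], d + 1))
      (res, (head.length : Int))).1
    =
    (file.foldl
      (fun (st : List (List String) × List String) l =>
        if pvIsDiv l then (st.1 ++ [st.2], []) else (st.1, st.2 ++ [l]))
      (res, temp)).1 := by
  intro file
  induction file with
  | nil => intro head temp res; simp [pvDivs_nil]
  | cons l rest ih =>
    intro head temp res
    rw [pvDivs_cons, List.foldl_cons]
    by_cases hp : pvIsDiv l
    · simp only [hp, if_true, List.foldl_cons]
      -- first step of B's loop emits the slice [head.length, head.length+temp.length) = temp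
      have hsl : PySem.List.slice (head ++ temp ++ (l :: rest))
          (some (head.length : Int)) (some ((head.length : Int) + (temp.length : Int)))
          = temp := by
        have h1 : ((head.length : Int) + (temp.length : Int)) = ((head.length + temp.length : Nat) : Int) := by
          push_cast; ring
        rw [h1, PySem.List.slice_natCast]
        rw [show head ++ temp ++ (l :: rest) = head ++ (temp ++ (l :: rest)) by simp]
        rw [List.drop_left, Nat.add_sub_cancel_left]
        exact List.take_left
      rw [hsl]
      have ihx := ih (head ++ temp ++ [l]) [] (res ++ [temp])
      simp only [List.append_assoc, List.singleton_append, List.append_nil,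
        List.length_append, List.length_cons, List.length_nil, Nat.zero_add,
        Nat.cast_add, Nat.cast_one, Nat.cast_zero, add_zero] at ihx ⊢
      exact ihx
    · simp only [hp, if_false, Bool.false_eq_true]
      have ihx := ih head (temp ++ [l]) res
      simp only [List.append_assoc, List.singleton_append,
        List.length_append, List.length_cons, List.length_nil, Nat.zero_add,
        Nat.cast_add, Nat.cast_one] at ihx ⊢
      have e4 : ((head.length : Int) + ((temp.length : Int) + 1))
          = ((head.length : Int) + (temp.length : Int) + 1) := by ring
      rw [e4] at ihx
      exact ihx

-- ===== VERDICT (by name: the statement is the Claim_ definition above) =====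
theorem parse_into_list_spec : Claim_equal_parse_into_list := by
  intro file _
  unfold Spec_parse_into_list parse_into_list parse_into_list_alt
  have h := loop_eq file [] [] []
  simp only [List.length_nil, Nat.cast_zero, List.nil_append, List.append_nil] at h
  rw [← h]
  norm_num [pvDivs]
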